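-- pv_equiv track=rewrite | github.com/brooke-lampe/soft160-recursion-lab | lab.py | maximal_repetition_free_subsequence_version_3
-- ===== SOURCE A (Python) =====
-- def maximal_repetition_free_subsequence_version_3(sequence):
--     """
--     Given a sequence, return the last of its longest repetition-free subsequences.  For example:
--
--     >>> maximal_repetition_free_subsequence_version_3([])
--     []
--     >>> maximal_repetition_free_subsequence_version_3([5])
--     [5]
--     >>> maximal_repetition_free_subsequence_version_3([5, 4])
--     [5, 4]
--     >>> maximal_repetition_free_subsequence_version_3([5, 4, 5])
--     [4, 5]
--     >>> maximal_repetition_free_subsequence_version_3([5, 4, 5, 3])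
--     [4, 5, 3]
--     >>> maximal_repetition_free_subsequence_version_3([3, 2, 1, 2, 4])
--     [1, 2, 4]
--     >>> maximal_repetition_free_subsequence_version_3([1, 2, 1, 2, 1, 2, 1])
--     [2, 1]
--     """
--     # return []  # stub
--
--     n = len(sequence)
--     if n == 0 or n == 1:
--         return sequence
--     if n == 2:
--         if sequence[0] != sequence[1]:
--             return sequence
--         return sequence[0:1]
--     for i in range(0, n):
--         for j in range(0, n):
--             if i != j and sequence[i] == sequence[j]:
--                 return maximal_repetition_free_subsequence_version_3(sequence[1:n])
--     return sequence
-- ===== SOURCE B (Python) =====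
-- def maximal_repetition_free_subsequence_version_3(sequence):
--     seen = set()
--     suffix = []
--     for x in reversed(sequence):
--         if x in seen:
--             break
--         suffix.append(x)
--         seen.add(x)
--     suffix.reverse()
--     return suffix
-- ===== Notes on version B (the rewrite author's own statement) =====
-- stated objective: faster
-- what changed: Replaces A's recursive front-peeling with a quadratic duplicate scan at every step by a single backward pass keeping a set of seen values that stops at the first repeated element.
import Mathlib
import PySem

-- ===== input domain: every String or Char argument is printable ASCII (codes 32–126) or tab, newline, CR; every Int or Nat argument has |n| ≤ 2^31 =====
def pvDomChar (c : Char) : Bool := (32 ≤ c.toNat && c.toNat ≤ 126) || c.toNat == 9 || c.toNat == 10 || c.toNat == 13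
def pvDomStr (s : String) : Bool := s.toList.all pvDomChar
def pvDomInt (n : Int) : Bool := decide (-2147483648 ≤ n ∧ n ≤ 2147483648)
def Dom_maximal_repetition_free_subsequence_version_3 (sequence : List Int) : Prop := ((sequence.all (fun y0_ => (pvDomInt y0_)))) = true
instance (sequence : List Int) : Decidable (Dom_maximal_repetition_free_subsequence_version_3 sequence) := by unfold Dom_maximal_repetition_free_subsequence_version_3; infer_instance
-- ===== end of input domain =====

-- B replaces A's quadratic duplicate scan + recursive front-peeling (O(n^3)) by a single
-- backward pass with a set that stops at the first repeated element (objective: faster).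

-- ===== PORT A =====
-- termination helper for the port's recursion on sequence[1:n] (cited by name in decreasing_by)
theorem pv_slice_length_lt (sequence : List Int) (h : sequence ≠ []) :
    (PySem.List.slice sequence (some 1) (some (sequence.length : Int))).length < sequence.length := by
  rw [PySem.List.slice_toNat sequence (by omega) (by omega)]
  simp only [List.length_take, List.length_drop]
  cases sequence with
  | nil => exact absurd rfl h
  | cons a l => simp

-- literal port of A: n ≤ 2 special cases, then the quadratic double loop over range(0,n);
-- an early 'return' inside the pure double loop is exactly List.any; recursion on sequence[1:n].
def maximal_repetition_free_subsequence_version_3 (sequence : List Int) : List Int :=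
  let n : Int := sequence.length
  if n = 0 ∨ n = 1 then sequence
  else if n = 2 then
    if PySem.List.pyGet? sequence 0 ≠ PySem.List.pyGet? sequence 1 then sequence
    else PySem.List.slice sequence (some 0) (some 1)
  else if (PySem.List.pyRange 0 n 1).any (fun i =>
            (PySem.List.pyRange 0 n 1).any (fun j =>
              decide (i ≠ j) && decide (PySem.List.pyGet? sequence i = PySem.List.pyGet? sequence j)))
  then maximal_repetition_free_subsequence_version_3 (PySem.List.slice sequence (some 1) (some n))
  else sequence
termination_by sequence.length
decreasing_by
  rename_i h1 h2 h3
  refine pv_slice_length_lt sequence ?_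
  rintro rfl
  simp only [n] at h1
  simp at h1

-- ===== PORT B =====
-- port of B's loop: walk reversed(sequence) with a seen-set, append until a repeat, then reverse.
def pvAltGo (rest : List Int) (seen : PySem.Set Int) (suffix : List Int) : List Int :=
  match rest with
  | [] => suffix
  | x :: rs =>
    if PySem.Set.contains seen x then suffix
    else pvAltGo rs (PySem.Set.add seen x) (suffix ++ [x])

def maximal_repetition_free_subsequence_version_3_alt (sequence : List Int) : List Int :=
  (pvAltGo sequence.reverse PySem.Set.empty []).reverse

-- ===== PRECONDITION & SPEC =====
def Spec_maximal_repetition_free_subsequence_version_3 (sequence : List Int) (out : List Int) : Prop := out = maximal_repetition_free_subsequence_version_3_alt sequence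
instance (sequence : List Int) (out : List Int) : Decidable (Spec_maximal_repetition_free_subsequence_version_3 sequence out) := by unfold Spec_maximal_repetition_free_subsequence_version_3; infer_instance

-- ===== CLAIM (what is proved, stated in full; the proofs are below) =====
def Claim_equal_maximal_repetition_free_subsequence_version_3 : Prop := ∀ (sequence : List Int), Dom_maximal_repetition_free_subsequence_version_3 sequence → Spec_maximal_repetition_free_subsequence_version_3 sequence (maximal_repetition_free_subsequence_version_3 sequence)

-- ===== LEMMAS AND PROOFS =====

-- If l is repetition-free and disjoint from seen, the scan consumes l entirely.
theorem pvAltGo_complete (l : List Int) : ∀ (l' : List Int) (seen : PySem.Set Int) (suffix : List Int),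
    l.Nodup → (∀ x ∈ l, x ∉ seen) →
    pvAltGo (l ++ l') seen suffix = pvAltGo l' (l.foldl PySem.Set.add seen) (suffix ++ l) := by
  induction l with
  | nil => intro l' seen suffix _ _; simp
  | cons x rs ih =>
    intro l' seen suffix hnd hdisj
    have hx : x ∉ seen := hdisj x (by simp)
    simp only [List.cons_append, pvAltGo]
    rw [if_neg (by simpa [PySem.Set.contains_iff] using hx)]
    rw [ih l' (PySem.Set.add seen x) (suffix ++ [x]) (List.Nodup.of_cons hnd)]
    · simp [List.foldl_cons]
    · intro y hy
      rw [PySem.Set.mem_add]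
      rintro (h | rfl)
      · exact hdisj y (by simp [hy]) h
      · exact (List.nodup_cons.mp hnd).1 hy

-- If the scan of l breaks (l has a repeat or meets seen), elements after l are irrelevant.
theorem pvAltGo_break (l : List Int) : ∀ (l' : List Int) (seen : PySem.Set Int) (suffix : List Int),
    ¬ (l.Nodup ∧ ∀ x ∈ l, x ∉ seen) →
    pvAltGo (l ++ l') seen suffix = pvAltGo l seen suffix := by
  induction l with
  | nil => intro l' seen suffix h; exact absurd ⟨List.nodup_nil, by simp⟩ h
  | cons x rs ih =>
    intro l' seen suffix h
    simp only [List.cons_append, pvAltGo]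
    by_cases hx : PySem.Set.contains seen x
    · rw [if_pos hx]; rw [if_pos hx]
    · rw [if_neg hx, if_neg hx]
      apply ih
      intro ⟨hnd, hdisj⟩
      apply h
      have hxs : x ∉ seen := by simpa [PySem.Set.contains_iff] using hx
      refine ⟨List.nodup_cons.mpr ⟨?_, hnd⟩, ?_⟩
      · intro hxmem
        exact (hdisj x hxmem) (by rw [PySem.Set.mem_add]; right; rfl)
      · intro y hy
        rcases List.mem_cons.mp hy with rfl | hy
        · exact hxs
        · intro hys; exact (hdisj y hy) (by rw [PySem.Set.mem_add]; left; exact hys)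

-- B returns the sequence itself when it is repetition-free.
theorem alt_of_nodup (sequence : List Int) (h : sequence.Nodup) :
    maximal_repetition_free_subsequence_version_3_alt sequence = sequence := by
  unfold maximal_repetition_free_subsequence_version_3_alt
  have h1 := pvAltGo_complete sequence.reverse [] PySem.Set.empty []
    (by simpa using h) (by simp [PySem.Set.empty])
  simp only [List.append_nil] at h1
  rw [h1]
  simp [pvAltGo]

-- B drops the head when the sequence has a repetition.
theorem alt_cons_of_not_nodup (x : Int) (xs : List Int) (h : ¬ (x :: xs).Nodup) :
    maximal_repetition_free_subsequence_version_3_alt (x :: xs) =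
    maximal_repetition_free_subsequence_version_3_alt xs := by
  unfold maximal_repetition_free_subsequence_version_3_alt
  rw [List.reverse_cons]
  by_cases hxs : xs.Nodup
  · -- xs repetition-free, so x ∈ xs; the scan finishes xs.reverse then stops at x
    have hx : x ∈ xs := by
      by_contra hx
      exact h (List.nodup_cons.mpr ⟨hx, hxs⟩)
    rw [pvAltGo_complete xs.reverse [x] PySem.Set.empty []
      (by simpa using hxs) (by simp [PySem.Set.empty])]
    have hmem : x ∈ xs.reverse.foldl PySem.Set.add PySem.Set.empty := by
      rw [show (PySem.Set.add : PySem.Set Int → Int → PySem.Set Int)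
            = (fun s b => PySem.Set.add s (id b)) from rfl,
        PySem.Set.mem_foldl_add]
      right; exact ⟨x, by simpa using hx, rfl⟩
    have hc : PySem.Set.contains (xs.reverse.foldl PySem.Set.add PySem.Set.empty) x = true := by
      rw [PySem.Set.contains_iff]; exact hmem
    simp only [pvAltGo]
    rw [if_pos hc]
    -- the other side also completes xs.reverse fully
    have h2 := pvAltGo_complete xs.reverse [] PySem.Set.empty []
      (by simpa using hxs) (by simp [PySem.Set.empty])
    simp only [List.append_nil] at h2
    rw [h2]
    simp [pvAltGo]
  · -- xs itself breaks, so the extra [x] at the end is never reached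
    rw [pvAltGo_break xs.reverse [x] PySem.Set.empty [] (by
      intro ⟨hnd, _⟩
      exact hxs (by simpa using hnd))]

-- the double loop over range(0, n) detects exactly non-Nodup
theorem loop_detects (sequence : List Int) :
    ((PySem.List.pyRange 0 (sequence.length : Int) 1).any (fun i =>
      (PySem.List.pyRange 0 (sequence.length : Int) 1).any (fun j =>
        decide (i ≠ j) && decide (PySem.List.pyGet? sequence i = PySem.List.pyGet? sequence j))) = true)
    ↔ ¬ sequence.Nodup := by
  rw [List.any_eq_true]
  constructor
  · rintro ⟨i, hi, hinner⟩
    rw [List.any_eq_true] at hinner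
    obtain ⟨j, hj, hcond⟩ := hinner
    rw [PySem.List.mem_pyRange_one] at hi hj
    simp only [Bool.and_eq_true, decide_eq_true_eq] at hcond
    obtain ⟨hne, heq⟩ := hcond
    rw [PySem.List.pyGet?_of_nonneg sequence hi.1, PySem.List.pyGet?_of_nonneg sequence hj.1] at heq
    intro hnd
    have hij : i.toNat ≠ j.toNat := by omega
    have hilt : i.toNat < sequence.length := by omega
    have hjlt : j.toNat < sequence.length := by omega
    simp only [List.getElem?_eq_getElem hilt, List.getElem?_eq_getElem hjlt,
      Option.some.injEq] at heq
    exact hij (List.Nodup.getElem_inj_iff hnd |>.mp heq)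
  · intro hnd
    rw [List.nodup_iff_getElem?_ne_getElem?] at hnd
    push Not at hnd
    obtain ⟨i, j, hij, hjlt, heq⟩ := hnd
    refine ⟨(i : Int), ?_, ?_⟩
    · rw [PySem.List.mem_pyRange_one]; constructor <;> [positivity; exact_mod_cast lt_trans hij hjlt]
    · rw [List.any_eq_true]
      refine ⟨(j : Int), ?_, ?_⟩
      · rw [PySem.List.mem_pyRange_one]; constructor <;> [positivity; exact_mod_cast hjlt]
      · simp only [Bool.and_eq_true, decide_eq_true_eq]
        refine ⟨by exact_mod_cast hij.ne, ?_⟩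
        rw [PySem.List.pyGet?_natCast, PySem.List.pyGet?_natCast, heq]

theorem a_eval_nil : maximal_repetition_free_subsequence_version_3 [] = [] := by
  rw [maximal_repetition_free_subsequence_version_3]; norm_num

theorem a_eval_singleton (x : Int) : maximal_repetition_free_subsequence_version_3 [x] = [x] := by
  rw [maximal_repetition_free_subsequence_version_3]; norm_num

-- A drops the head when the sequence (length ≥ 2) has a repetition.
theorem a_cons_of_not_nodup (x y : Int) (ys : List Int) (h : ¬ (x :: y :: ys).Nodup) :
    maximal_repetition_free_subsequence_version_3 (x :: y :: ys) =
    maximal_repetition_free_subsequence_version_3 (y :: ys) := by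
  conv_lhs => rw [maximal_repetition_free_subsequence_version_3]
  by_cases hys : ys = []
  · subst hys
    have hxy : x = y := by
      by_contra hne
      exact h (by simp [hne])
    subst hxy
    rw [if_neg (by norm_num), if_pos (by norm_num)]
    rw [if_neg (by simp)]
    rw [a_eval_singleton]
    simp [PySem.List.slice_toNat]
  · have h3 : 3 ≤ (x :: y :: ys).length := by
      rcases ys with _ | _ <;> simp_all
    rw [if_neg (by simp only [List.length_cons]; push_cast; omega),
      if_neg (by simp only [List.length_cons] at h3 ⊢; push_cast; omega)]
    rw [if_pos (by rw [loop_detects]; exact h)]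
    congr 1
    rw [PySem.List.slice_toNat _ (by omega) (by positivity)]
    simp
    omega

-- A returns the sequence itself when it is repetition-free.
theorem a_of_nodup (sequence : List Int) (h : sequence.Nodup) :
    maximal_repetition_free_subsequence_version_3 sequence = sequence := by
  match sequence with
  | [] => exact a_eval_nil
  | [x] => exact a_eval_singleton x
  | x :: y :: ys =>
    rw [maximal_repetition_free_subsequence_version_3]
    by_cases hys : ys = []
    · subst hys
      have hxy : x ≠ y := by simpa using h
      simp [hxy]
    · have h3 : 3 ≤ (x :: y :: ys).length := by
        rcases ys with _ | _ <;> simp_all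
      rw [if_neg (by simp only [List.length_cons]; push_cast; omega),
        if_neg (by simp only [List.length_cons] at h3 ⊢; push_cast; omega)]
      rw [if_neg (by rw [loop_detects]; exact fun hc => hc h)]

theorem a_eq_alt (sequence : List Int) :
    maximal_repetition_free_subsequence_version_3 sequence =
    maximal_repetition_free_subsequence_version_3_alt sequence := by
  induction sequence with
  | nil => rw [a_eval_nil]; rfl
  | cons x xs ih =>
    match xs, ih with
    | [], _ => rw [a_eval_singleton]; rfl
    | y :: ys, ih =>
      by_cases hnd : (x :: y :: ys).Nodup
      · rw [a_of_nodup _ hnd, alt_of_nodup _ hnd]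
      · rw [a_cons_of_not_nodup x y ys hnd, ih, alt_cons_of_not_nodup x (y :: ys) hnd]

-- ===== VERDICT (by name: the statement is the Claim_ definition above) =====
theorem maximal_repetition_free_subsequence_version_3_spec : Claim_equal_maximal_repetition_free_subsequence_version_3 := by
  intro sequence _
  exact a_eq_alt sequence
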